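-- pv_equiv track=rewrite | github.com/davidiach/erdos97 | src/erdos97/n8_incidence.py | matrix_to_row_masks
-- ===== SOURCE A (Python) =====
-- from typing import Iterable
--
-- def matrix_to_row_masks(matrix: Iterable[Iterable[int]]) -> tuple[int, ...]:
--     out = []
--     for row in matrix:
--         mask = 0
--         for idx, value in enumerate(row):
--             if value:
--                 mask |= 1 << idx
--         out.append(mask)
--     return tuple(out)
-- ===== SOURCE B (Python) =====
-- def matrix_to_row_masks(matrix):
--     # Divide and conquer: the mask of a row is mask(lo-half) plus mask(hi-half)
--     # shifted past the lo-half, recursing down to single elements.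
--     def mask_of(row):
--         n = len(row)
--         if n == 0:
--             return 0
--         if n == 1:
--             return 1 if row[0] else 0
--         mid = n // 2
--         return mask_of(row[:mid]) + (mask_of(row[mid:]) << mid)
--     return tuple(mask_of(list(row)) for row in matrix)
-- ===== Notes on version B (the rewrite author's own statement) =====
-- stated objective: alternative
-- what changed: Replaces A's linear enumerate/shift/bitwise-or accumulator with a divide-and-conquer recursion: each row's mask is mask(first half) + (mask(second half) << mid), recursing down to single elements.
import Mathlib
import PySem

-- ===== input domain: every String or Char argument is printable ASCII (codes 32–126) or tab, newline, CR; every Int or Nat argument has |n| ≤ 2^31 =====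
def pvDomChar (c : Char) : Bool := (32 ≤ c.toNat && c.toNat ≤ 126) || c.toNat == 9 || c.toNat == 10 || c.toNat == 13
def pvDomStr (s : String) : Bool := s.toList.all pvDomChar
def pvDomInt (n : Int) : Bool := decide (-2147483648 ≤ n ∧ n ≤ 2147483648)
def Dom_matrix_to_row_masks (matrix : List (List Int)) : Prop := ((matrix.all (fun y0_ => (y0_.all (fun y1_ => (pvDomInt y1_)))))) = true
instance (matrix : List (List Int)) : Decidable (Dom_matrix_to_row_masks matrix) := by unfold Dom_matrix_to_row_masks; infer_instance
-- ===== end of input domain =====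

-- B replaces A's linear enumerate/shift/bitwise-or accumulator with a divide-and-conquer
-- recursion (mask = mask(lo half) + mask(hi half) << mid), an alternative algorithm of the same cost up to a log factor.

-- ===== PORT A =====
-- for row in matrix: mask = 0; for idx, value in enumerate(row): if value: mask |= 1 << idx; out.append(mask)
-- (idx from enumerate is ≥ 0, so .toNat on it is exact; Python `|` on ints is PySem.Int.bor)
def matrix_to_row_masks_step (mask : Int) (iv : Int × Int) : Int :=
  if iv.2 ≠ 0 then PySem.Int.bor mask ((1 : Int) <<< iv.1.toNat) else mask

def matrix_to_row_masks (matrix : List (List Int)) : List Int :=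
  matrix.foldl (fun out row =>
    out ++ [(PySem.List.enumerate row 0).foldl matrix_to_row_masks_step 0]) []

-- ===== PORT B =====
-- def mask_of(row): n = len(row); if n == 0: 0; if n == 1: 1 if row[0] else 0;
--   mid = n // 2; return mask_of(row[:mid]) + (mask_of(row[mid:]) << mid)
-- (row[:mid] / row[mid:] with 0 ≤ mid ≤ n are exactly List.take / List.drop; mid ≥ 0 so the Nat shift is exact)
def matrix_to_row_masks_maskOf : List Int → Int
  | [] => 0
  | [v] => if v ≠ 0 then 1 else 0
  | v :: w :: rest =>
    let mid := (v :: w :: rest).length / 2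
    matrix_to_row_masks_maskOf ((v :: w :: rest).take mid)
      + (matrix_to_row_masks_maskOf ((v :: w :: rest).drop mid)) <<< mid
termination_by row => row.length
decreasing_by
· simp [List.length_take]; omega
· simp; omega

-- return tuple(mask_of(list(row)) for row in matrix)
def matrix_to_row_masks_alt (matrix : List (List Int)) : List Int :=
  matrix.map matrix_to_row_masks_maskOf

-- ===== PRECONDITION & SPEC =====
def Spec_matrix_to_row_masks (matrix : List (List Int)) (out : List Int) : Prop := out = matrix_to_row_masks_alt matrix
instance (matrix : List (List Int)) (out : List Int) : Decidable (Spec_matrix_to_row_masks matrix out) := by unfold Spec_matrix_to_row_masks; infer_instance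

-- ===== CLAIM (what is proved, stated in full; the proofs are below) =====
def Claim_equal_matrix_to_row_masks : Prop := ∀ (matrix : List (List Int)), Dom_matrix_to_row_masks matrix → Spec_matrix_to_row_masks matrix (matrix_to_row_masks matrix)

-- ===== LEMMAS AND PROOFS =====

-- the common value of a row, as a natural number (LSB-first positional value of the truthiness bits)
def pvRowVal (row : List Int) : Nat :=
  row.foldr (fun v a => (if v ≠ 0 then 1 else 0) + 2 * a) 0

theorem pv_lor_two_pow_add (k m : Nat) (h : m < 2 ^ k) : m ||| 2 ^ k = m + 2 ^ k := by
  induction k generalizing m with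
  | zero => interval_cases m <;> decide
  | succ k ih =>
    have hb : Nat.bit (m.testBit 0) (m >>> 1) = m := Nat.bit_testBit_zero_shiftRight_one m
    have h2 : (2 : Nat) ^ (k + 1) = Nat.bit false (2 ^ k) := by simp [Nat.bit]; ring
    have hq : m >>> 1 < 2 ^ k := by
      rw [Nat.shiftRight_one]
      have : (2 : Nat) ^ (k + 1) = 2 * 2 ^ k := by ring
      omega
    calc m ||| 2 ^ (k + 1)
        = Nat.bit (m.testBit 0) (m >>> 1) ||| Nat.bit false (2 ^ k) := by rw [hb, ← h2]
      _ = Nat.bit (m.testBit 0 || false) ((m >>> 1) ||| 2 ^ k) := Nat.lor_bit _ _ _ _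
      _ = Nat.bit (m.testBit 0) ((m >>> 1) + 2 ^ k) := by rw [ih _ hq]; simp
      _ = m + 2 ^ (k + 1) := by
        cases hm : m.testBit 0 <;> rw [hm] at hb <;> simp [Nat.bit] at hb ⊢ <;>
          rw [Nat.shiftRight_one] at hb <;> have hp : (2 : Nat) ^ (k + 1) = 2 * 2 ^ k := by ring
        all_goals omega

theorem pv_rowVal_append (l r : List Int) :
    pvRowVal (l ++ r) = pvRowVal l + 2 ^ l.length * pvRowVal r := by
  induction l with
  | nil => simp [pvRowVal]
  | cons v t ih =>
    simp only [List.cons_append, pvRowVal, List.foldr_cons, List.length_cons] at *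
    rw [ih]; ring

theorem pv_maskOf_eq (row : List Int) :
    matrix_to_row_masks_maskOf row = (pvRowVal row : Int) := by
  induction hn : row.length using Nat.strong_induction_on generalizing row with
  | _ n ih =>
    match row with
    | [] => simp [matrix_to_row_masks_maskOf, pvRowVal]
    | [v] => by_cases hv : v ≠ 0 <;> simp [matrix_to_row_masks_maskOf, pvRowVal, hv]
    | v :: w :: rest =>
      rw [matrix_to_row_masks_maskOf]
      have hlen : (v :: w :: rest).length = n := hn
      set r := v :: w :: rest with hr
      have hn2 : 2 ≤ n := by
        have : r.length = rest.length + 2 := by simp [hr]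
        omega
      have hmid2 : n / 2 < n := by omega
      simp only [hlen]
      have htl : (r.take (n / 2)).length = n / 2 := by
        simp [List.length_take, hlen]; omega
      have hdl : (r.drop (n / 2)).length = n - n / 2 := by
        simp [hlen]
      rw [ih (n / 2) hmid2 _ htl, ih (n - n / 2) (by omega) _ hdl]
      have hsplit : pvRowVal r = pvRowVal (r.take (n / 2))
          + 2 ^ (n / 2) * pvRowVal (r.drop (n / 2)) := by
        conv_lhs => rw [← List.take_append_drop (n / 2) r]
        rw [pv_rowVal_append, htl]
      rw [Int.shiftLeft_eq, hsplit]
      push_cast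
      ring

theorem pv_A_loop (row : List Int) : ∀ (k m : Nat), m < 2 ^ k →
    (PySem.List.enumerate row (k : Int)).foldl matrix_to_row_masks_step (m : Int)
    = ((m + 2 ^ k * pvRowVal row : Nat) : Int) := by
  induction row with
  | nil => intro k m h; simp [PySem.List.enumerate_nil, pvRowVal]
  | cons v t ih =>
    intro k m h
    rw [PySem.List.enumerate_cons]
    have hk1 : ((k : Int) + 1) = ((k + 1 : Nat) : Int) := by push_cast; ring
    by_cases hv : v ≠ 0
    · simp only [List.foldl_cons, matrix_to_row_masks_step, hv, ne_eq, not_false_eq_true,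
        if_true, Int.toNat_natCast, hk1]
      have hsh : ((1 : Int) <<< k) = ((2 ^ k : Nat) : Int) := by
        rw [Int.shiftLeft_eq]; push_cast; ring
      rw [hsh, PySem.Int.bor_natCast, pv_lor_two_pow_add k m h]
      have hb : m + 2 ^ k < 2 ^ (k + 1) := by
        have : (2 : Nat) ^ (k + 1) = 2 * 2 ^ k := by ring
        omega
      rw [ih (k + 1) (m + 2 ^ k) hb]
      congr 1
      simp [pvRowVal, hv]
      ring
    · simp only [List.foldl_cons, matrix_to_row_masks_step, hv, hk1]
      simp only [ne_eq, not_not] at hv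
      simp only [hv, if_false]
      have hb : m < 2 ^ (k + 1) := by
        have : (2 : Nat) ^ (k + 1) = 2 * 2 ^ k := by ring
        omega
      rw [ih (k + 1) m hb]
      congr 1
      simp [pvRowVal, hv]
      ring

theorem pv_A_row (row : List Int) :
    (PySem.List.enumerate row 0).foldl matrix_to_row_masks_step 0 = (pvRowVal row : Int) := by
  have h := pv_A_loop row 0 0 (by norm_num)
  simpa using h

theorem pv_foldl_append (l : List (List Int)) (f : List Int → Int) :
    ∀ acc, l.foldl (fun out row => out ++ [f row]) acc = acc ++ l.map f := by
  induction l with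
  | nil => intro acc; simp
  | cons r t ih => intro acc; simp [List.foldl_cons, ih]

-- ===== VERDICT (by name: the statement is the Claim_ definition above) =====
theorem matrix_to_row_masks_spec : Claim_equal_matrix_to_row_masks := by
  intro matrix _
  unfold Spec_matrix_to_row_masks matrix_to_row_masks matrix_to_row_masks_alt
  rw [pv_foldl_append]
  simp only [List.nil_append]
  apply List.map_congr_left
  intro row _
  rw [pv_A_row, pv_maskOf_eq]
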